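-- pv_equiv track=rewrite | github.com/Jisan129/tts_refined | src/tts_writer.py | split_long_words
-- ===== SOURCE A (Python) =====
-- def split_long_words(words, max_words):
--     word_chunks = []
--     current_word_chunk = ""
--
--     for word in words:
--         if len((current_word_chunk + word).split(" ")) <= max_words:
--             current_word_chunk += word + " "
--         else:
--             if current_word_chunk != "":
--                 word_chunks.append(current_word_chunk.strip())
--                 current_word_chunk = ""
--             word_chunks.append(word)
--
--     if current_word_chunk != "":
--         word_chunks.append(current_word_chunk.strip())
--
--     return word_chunks
-- ===== SOURCE B (Python) =====
-- def split_long_words(words, max_words):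
--     # Chunk-at-a-time: repeatedly scan ahead for the maximal run of words whose
--     # combined space-separated token count fits in max_words, join that run in
--     # one step, and emit the word that broke the run on its own line.
--     chunks = []
--     i = 0
--     n = len(words)
--     while i < n:
--         total = 0
--         j = i
--         while j < n:
--             t = words[j].count(" ") + 1
--             if total + t > max_words:
--                 break
--             total += t
--             j += 1
--         if j > i:
--             chunks.append(" ".join(words[i:j]).strip())
--             if j < n:
--                 chunks.append(words[j])
--                 j += 1
--         else:
--             chunks.append(words[i])
--             j = i + 1
--         i = j
--     return chunks
-- ===== Notes on version B (the rewrite author's own statement) =====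
-- stated objective: faster
-- what changed: B works chunk-at-a-time: an outer loop repeatedly scans ahead for the maximal run of words whose combined token count fits, joins that whole run in one step, and emits the breaking word alone, instead of A's word-at-a-time accumulator that rebuilds and re-splits the growing chunk string at every word.
import Mathlib
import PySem

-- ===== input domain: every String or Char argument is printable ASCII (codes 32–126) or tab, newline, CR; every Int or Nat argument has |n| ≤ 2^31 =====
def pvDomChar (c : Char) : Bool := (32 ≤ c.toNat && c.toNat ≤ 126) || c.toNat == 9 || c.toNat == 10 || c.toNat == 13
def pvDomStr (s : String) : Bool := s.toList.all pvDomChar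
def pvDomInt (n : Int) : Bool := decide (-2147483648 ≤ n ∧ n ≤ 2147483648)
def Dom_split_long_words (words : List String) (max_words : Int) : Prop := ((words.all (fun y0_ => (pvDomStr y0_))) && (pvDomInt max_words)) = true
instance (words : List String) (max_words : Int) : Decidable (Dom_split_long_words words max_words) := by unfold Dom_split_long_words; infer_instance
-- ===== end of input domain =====

-- B replaces A's word-at-a-time accumulator (which re-splits the growing chunk string at
-- every word) by a chunk-at-a-time outer loop: scan ahead for the maximal fitting run,
-- join it in one step, emit the breaking word alone (objective: faster).

-- ===== PORT A =====
-- current_word_chunk is carried as a List Char (PySem strings are defined on List Char).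
def split_long_words (words : List String) (max_words : Int) : List String :=
  let st := words.foldl (fun (st : List String × List Char) word =>
    let chunks := st.1
    let cur := st.2
    if ((PySem.Chars.splitOn (cur ++ word.toList) [' ']).length : Int) ≤ max_words then
      (chunks, cur ++ word.toList ++ [' '])
    else
      let p := if cur ≠ [] then (chunks ++ [String.ofList (PySem.Chars.strip cur)], ([] : List Char))
               else (chunks, cur)
      (p.1 ++ [word], p.2)) ([], [])
  if st.2 ≠ [] then st.1 ++ [String.ofList (PySem.Chars.strip st.2)] else st.1

-- ===== PORT B =====
-- inner while loop of Source B: number of leading words that fit, given the running total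
def pvScanB (max_words : Int) (total : Int) (ws : List String) : Nat :=
  match ws with
  | [] => 0
  | w :: t =>
    let tk : Int := (PySem.Str.count w " " : Int) + 1
    if max_words < total + tk then 0 else pvScanB max_words (total + tk) t + 1

-- outer while loop of Source B: emit the maximal fitting run (joined in one step) and the
-- breaking word, then continue on the remaining words
def pvChunksB (max_words : Int) (ws : List String) : List String :=
  match ws with
  | [] => []
  | w :: t =>
    let k := pvScanB max_words 0 (w :: t)
    if k = 0 then w :: pvChunksB max_words t
    else
      let head := PySem.Str.strip (PySem.Str.join " " ((w :: t).take k))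
      match h : (w :: t).drop k with
      | [] => [head]
      | _b :: rest => head :: _b :: pvChunksB max_words rest
termination_by ws.length
decreasing_by
  · simp
  · have h1 := congrArg List.length h
    simp only [List.length_drop, List.length_cons] at h1 ⊢
    omega

def split_long_words_alt (words : List String) (max_words : Int) : List String :=
  pvChunksB max_words words

-- ===== PRECONDITION & SPEC =====
def Spec_split_long_words (words : List String) (max_words : Int) (out : List String) : Prop := out = split_long_words_alt words max_words
instance (words : List String) (max_words : Int) (out : List String) : Decidable (Spec_split_long_words words max_words out) := by unfold Spec_split_long_words; infer_instance

-- ===== CLAIM (what is proved, stated in full; the proofs are below) =====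
def Claim_equal_split_long_words : Prop := ∀ (words : List String) (max_words : Int), Dom_split_long_words words max_words → Spec_split_long_words words max_words (split_long_words words max_words)

-- ===== LEMMAS AND PROOFS =====

-- A's chunk string built from the words ws: each word followed by a space.
def pvChunkStr (ws : List String) : List Char := (ws.map (fun w => w.toList ++ [' '])).flatten

-- B's token count of the same chunk.
def pvTokOf (ws : List String) : Int := (((ws.map (fun w => w.toList.count ' ' + 1)).sum : Nat) : Int)

-- A's loop rephrased as recursion carrying the current chunk as a word list.
def pvOuterG (max_words : Int) (cur : List String) (ws : List String) : List String :=
  match ws with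
  | [] => if cur ≠ [] then [PySem.Str.strip (PySem.Str.join " " cur)] else []
  | w :: t =>
    if pvTokOf cur + ((PySem.Str.count w " " : Int) + 1) ≤ max_words then
      pvOuterG max_words (cur ++ [w]) t
    else
      (if cur ≠ [] then [PySem.Str.strip (PySem.Str.join " " cur)] else []) ++ w :: pvOuterG max_words [] t

lemma splitOn_go_space_length (fuel : Nat) : ∀ (l cur : List Char) (acc : List (List Char)),
    l.length ≤ fuel →
    (PySem.Chars.splitOn.go [' '] fuel l cur acc).length = acc.length + l.count ' ' + 1 := by
  induction fuel with
  | zero =>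
    intro l cur acc h
    have : l = [] := List.eq_nil_of_length_eq_zero (Nat.le_zero.mp h)
    subst this
    simp [PySem.Chars.splitOn.go]
  | succ n ih =>
    intro l cur acc h
    cases l with
    | nil => simp [PySem.Chars.splitOn.go]
    | cons c rest =>
      by_cases hc : c = ' '
      · subst hc
        simp only [PySem.Chars.splitOn.go, List.isPrefixOf, BEq.rfl, Bool.true_and,
          if_pos, List.length_cons, List.drop_succ_cons]
        simp only [List.length_nil, List.drop_zero]
        rw [ih rest [] (cur.reverse :: acc) (by simpa using Nat.lt_succ_iff.mp (by simpa using h))]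
        simp
        omega
      · have hpre : ([' '].isPrefixOf (c :: rest)) = false := by
          simp [List.isPrefixOf]
          intro hcc; exact absurd hcc.symm hc
        simp only [PySem.Chars.splitOn.go, hpre, Bool.false_eq_true, if_false]
        rw [ih rest (c :: cur) acc (by simpa using Nat.lt_succ_iff.mp (by simpa using h))]
        simp [hc]

lemma splitOn_space_length (l : List Char) :
    (PySem.Chars.splitOn l [' ']).length = l.count ' ' + 1 := by
  unfold PySem.Chars.splitOn
  rw [splitOn_go_space_length (l.length + 1) l [] [] (by omega)]
  simp

lemma count_go_space (fuel : Nat) : ∀ (l : List Char) (acc : Nat),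
    l.length ≤ fuel →
    PySem.Chars.count.go [' '] fuel l acc = acc + l.count ' ' := by
  induction fuel with
  | zero =>
    intro l acc h
    have : l = [] := List.eq_nil_of_length_eq_zero (Nat.le_zero.mp h)
    subst this
    simp [PySem.Chars.count.go]
  | succ n ih =>
    intro l acc h
    cases l with
    | nil => simp [PySem.Chars.count.go]
    | cons c rest =>
      by_cases hc : c = ' '
      · subst hc
        simp only [PySem.Chars.count.go, List.isPrefixOf, BEq.rfl, Bool.true_and,
          if_pos, List.length_cons, List.drop_succ_cons]
        simp only [List.length_nil, List.drop_zero]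
        rw [ih rest (acc + 1) (by simpa using Nat.lt_succ_iff.mp (by simpa using h))]
        simp
        omega
      · have hpre : ([' '].isPrefixOf (c :: rest)) = false := by
          simp [List.isPrefixOf]
          intro hcc; exact absurd hcc.symm hc
        simp only [PySem.Chars.count.go, hpre, Bool.false_eq_true, if_false]
        rw [ih rest acc (by simpa using Nat.lt_succ_iff.mp (by simpa using h))]
        simp [hc]

lemma chars_count_space (l : List Char) : PySem.Chars.count l [' '] = l.count ' ' := by
  unfold PySem.Chars.count
  rw [if_neg (by simp)]
  simpa using count_go_space l.length l 0 (le_refl _)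

lemma str_count_space (w : String) : PySem.Str.count w " " = w.toList.count ' ' := by
  show PySem.Chars.count w.toList [' '] = w.toList.count ' '
  exact chars_count_space w.toList

lemma chunkStr_append (ws : List String) (w : String) :
    pvChunkStr (ws ++ [w]) = pvChunkStr ws ++ w.toList ++ [' '] := by
  simp [pvChunkStr]

lemma chunkStr_eq_nil_iff (ws : List String) : pvChunkStr ws = [] ↔ ws = [] := by
  cases ws with
  | nil => simp [pvChunkStr]
  | cons w t => simp [pvChunkStr]

lemma count_chunkStr (ws : List String) :
    (pvChunkStr ws).count ' ' = (ws.map (fun w => w.toList.count ' ' + 1)).sum := by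
  induction ws with
  | nil => simp [pvChunkStr]
  | cons w t ih =>
    simp only [pvChunkStr, List.map_cons, List.flatten_cons, List.count_append, List.sum_cons]
    rw [← pvChunkStr, ih]
    simp

lemma tokOf_append (ws : List String) (w : String) :
    pvTokOf (ws ++ [w]) = pvTokOf ws + ((PySem.Str.count w " " : Int) + 1) := by
  simp only [pvTokOf, str_count_space, List.map_append, List.sum_append, List.map_cons,
    List.map_nil, List.sum_cons, List.sum_nil]
  push_cast
  ring

lemma cond_iff (ws : List String) (w : String) (max_words : Int) :
    (((PySem.Chars.splitOn (pvChunkStr ws ++ w.toList) [' ']).length : Int) ≤ max_words) ↔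
    (pvTokOf ws + ((PySem.Str.count w " " : Int) + 1) ≤ max_words) := by
  rw [splitOn_space_length]
  have : ((pvChunkStr ws ++ w.toList).count ' ' + 1 : Int) = pvTokOf ws + ((PySem.Str.count w " " : Int) + 1) := by
    simp only [List.count_append, count_chunkStr, pvTokOf, str_count_space]
    push_cast
    ring
  omega

lemma rstrip_append_space (l : List Char) :
    PySem.Chars.rstrip (l ++ [' ']) = PySem.Chars.rstrip l := by
  simp [PySem.Chars.rstrip, List.dropWhile]
  rfl

lemma strip_append_space (l : List Char) :
    PySem.Chars.strip (l ++ [' ']) = PySem.Chars.strip l := by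
  simp only [PySem.Chars.strip, PySem.Chars.lstrip, List.dropWhile_append]
  split_ifs with h
  · have : List.dropWhile PySem.Chars.isspace l = [] := by
      simpa using h
    rw [this]
    simp [List.dropWhile]
    rfl
  · have : List.dropWhile PySem.Chars.isspace l ≠ [] := by
      simpa using h
    rw [rstrip_append_space]

lemma chunkStr_intercalate (ws : List String) (h : ws ≠ []) :
    pvChunkStr ws = List.intercalate [' '] (ws.map String.toList) ++ [' '] := by
  induction ws with
  | nil => exact absurd rfl h
  | cons w t ih =>
    cases t with
    | nil => simp [pvChunkStr, List.intercalate]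
    | cons w2 t2 =>
      have ht : (w2 :: t2 : List String) ≠ [] := by simp
      simp only [pvChunkStr, List.map_cons, List.flatten_cons] at *
      rw [← pvChunkStr] at *
      rw [ih ht]
      have h2 : ∀ (x y : List Char) (t : List (List Char)),
          [' '].intercalate (x :: y :: t) = x ++ ' ' :: [' '].intercalate (y :: t) := fun _ _ _ => rfl
      simp [h2]

lemma strip_eq (ws : List String) (h : ws ≠ []) :
    String.ofList (PySem.Chars.strip (pvChunkStr ws)) = PySem.Str.strip (PySem.Str.join " " ws) := by
  have hj : (PySem.Str.join " " ws).toList = List.intercalate [' '] (ws.map String.toList) := by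
    simp [PySem.Str.join, PySem.Chars.join, String.toList_ofList]
  simp only [PySem.Str.strip, hj]
  rw [chunkStr_intercalate ws h, strip_append_space]

-- A's fold, started with chunk cur (as its string), computes pvOuterG.
lemma A_to_G (max_words : Int) (words : List String) : ∀ (ch cur : List String),
    (let st := words.foldl (fun (st : List String × List Char) word =>
        let chunks := st.1
        let cur := st.2
        if ((PySem.Chars.splitOn (cur ++ word.toList) [' ']).length : Int) ≤ max_words then
          (chunks, cur ++ word.toList ++ [' '])
        else
          let p := if cur ≠ [] then (chunks ++ [String.ofList (PySem.Chars.strip cur)], ([] : List Char))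
                   else (chunks, cur)
          (p.1 ++ [word], p.2)) (ch, pvChunkStr cur)
     if st.2 ≠ [] then st.1 ++ [String.ofList (PySem.Chars.strip st.2)] else st.1) =
    ch ++ pvOuterG max_words cur words := by
  induction words with
  | nil =>
    intro ch cur
    simp only [List.foldl_nil, pvOuterG]
    by_cases h : cur = []
    · subst h; simp [pvChunkStr]
    · have h1 : pvChunkStr cur ≠ [] := fun hc => h ((chunkStr_eq_nil_iff cur).mp hc)
      simp only [if_pos h1, ne_eq, h, not_false_eq_true, if_pos]
      rw [strip_eq cur h]
  | cons w t ih =>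
    intro ch cur
    simp only [List.foldl_cons, pvOuterG]
    by_cases hcond : pvTokOf cur + ((PySem.Str.count w " " : Int) + 1) ≤ max_words
    · have hcA : ((PySem.Chars.splitOn (pvChunkStr cur ++ w.toList) [' ']).length : Int) ≤ max_words :=
        (cond_iff cur w max_words).mpr hcond
      simp only [if_pos hcA, if_pos hcond]
      have := ih ch (cur ++ [w])
      rw [chunkStr_append] at this
      exact this
    · have hcA : ¬ ((PySem.Chars.splitOn (pvChunkStr cur ++ w.toList) [' ']).length : Int) ≤ max_words :=
        fun hc => hcond ((cond_iff cur w max_words).mp hc)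
      simp only [if_neg hcA, if_neg hcond]
      by_cases h : cur = []
      · subst h
        simp only [pvChunkStr, List.map_nil, List.flatten_nil, ne_eq, not_true_eq_false, if_false]
        have := ih (ch ++ [w]) []
        simpa [pvChunkStr] using this
      · have h1 : pvChunkStr cur ≠ [] := fun hc => h ((chunkStr_eq_nil_iff cur).mp hc)
        simp only [if_pos h1, ne_eq, h, not_false_eq_true, if_pos]
        rw [strip_eq cur h]
        have := ih (ch ++ [PySem.Str.strip (PySem.Str.join " " cur)] ++ [w]) []
        simp only [pvChunkStr, List.map_nil, List.flatten_nil] at this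
        rw [this]
        simp

-- the running count of pvScanB matches pvTokOf of the words already taken
lemma tokOf_single (w : String) : pvTokOf [w] = (PySem.Str.count w " " : Int) + 1 := by
  simp only [pvTokOf, str_count_space, List.map_cons, List.map_nil, List.sum_cons, List.sum_nil]
  push_cast
  ring

-- chunk characterisation of pvOuterG: with a nonempty current chunk it emits the chunk
-- extended by the maximal fitting run, then the breaking word, then continues fresh.
lemma G_chunk (max_words : Int) : ∀ (ws cur : List String), cur ≠ [] →
    pvOuterG max_words cur ws =
      (let k := pvScanB max_words (pvTokOf cur) ws
       let head := PySem.Str.strip (PySem.Str.join " " (cur ++ ws.take k))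
       match ws.drop k with
       | [] => [head]
       | b :: rest => head :: b :: pvOuterG max_words [] rest) := by
  intro ws
  induction ws with
  | nil =>
    intro cur h
    simp [pvOuterG, pvScanB, h]
  | cons w t ih =>
    intro cur h
    simp only [pvOuterG, pvScanB]
    by_cases hcond : pvTokOf cur + ((PySem.Str.count w " " : Int) + 1) ≤ max_words
    · have hlt : ¬ max_words < pvTokOf cur + ((PySem.Str.count w " " : Int) + 1) := not_lt.mpr hcond
      simp only [if_pos hcond, if_neg hlt]
      rw [ih (cur ++ [w]) (by simp)]
      rw [tokOf_append]
      simp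
    · have hlt : max_words < pvTokOf cur + ((PySem.Str.count w " " : Int) + 1) := not_le.mp hcond
      simp only [if_neg hcond, if_pos hlt, ne_eq, h, not_false_eq_true, if_pos]
      simp

-- alignment of pvOuterG (A's recursion shape) with pvChunksB (B's chunk-at-a-time loop)
lemma G_eq_chunksB (max_words : Int) : ∀ (n : Nat) (ws : List String), ws.length ≤ n →
    pvOuterG max_words [] ws = pvChunksB max_words ws := by
  intro n
  induction n with
  | zero =>
    intro ws h
    have : ws = [] := List.eq_nil_of_length_eq_zero (Nat.le_zero.mp h)
    subst this
    simp [pvOuterG, pvChunksB]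
  | succ n ih =>
    intro ws h
    cases ws with
    | nil => simp [pvOuterG, pvChunksB]
    | cons w t =>
      have htok0 : pvTokOf ([] : List String) = 0 := by simp [pvTokOf]
      by_cases hcond : (0 : Int) + ((PySem.Str.count w " " : Int) + 1) ≤ max_words
      · -- first word fits: k ≥ 1
        have hlt : ¬ max_words < 0 + ((PySem.Str.count w " " : Int) + 1) := not_lt.mpr hcond
        have hG : pvOuterG max_words ([] : List String) (w :: t) = pvOuterG max_words [w] t := by
          simp only [pvOuterG, htok0]
          rw [if_pos (by simpa using hcond)]
          simp
        have htk : (0 : Int) + ((PySem.Str.count w " " : Int) + 1) = pvTokOf [w] := by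
          rw [tokOf_single]; ring
        have hk : pvScanB max_words 0 (w :: t) = pvScanB max_words (pvTokOf [w]) t + 1 := by
          show (if max_words < 0 + ((PySem.Str.count w " " : Int) + 1) then 0
                else pvScanB max_words (0 + ((PySem.Str.count w " " : Int) + 1)) t + 1)
               = pvScanB max_words (pvTokOf [w]) t + 1
          rw [if_neg hlt, htk]
        rw [hG, G_chunk max_words t [w] (by simp)]
        rw [pvChunksB]
        rw [if_neg (by omega)]
        have hhead : PySem.Str.strip (PySem.Str.join " " ([w] ++ t.take (pvScanB max_words (pvTokOf [w]) t)))
            = PySem.Str.strip (PySem.Str.join " " ((w :: t).take (pvScanB max_words 0 (w :: t)))) := by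
          rw [hk]
          simp
        cases hd : t.drop (pvScanB max_words (pvTokOf [w]) t) with
        | nil =>
          simp only [hd, hhead]
          split
          · rfl
          · rename_i b2 rest2 heq
            rw [hk, List.drop_succ_cons, hd] at heq
            simp at heq
        | cons b rest =>
          have hlen : rest.length ≤ n := by
            have h1 := congrArg List.length hd
            rw [List.length_drop] at h1
            simp only [List.length_cons] at h1
            have ht : t.length ≤ n := by simpa using Nat.lt_succ_iff.mp (by simpa using h)
            omega
          simp only [hd, hhead]
          split
          · rename_i heq
            rw [hk, List.drop_succ_cons, hd] at heq
            simp at heq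
          · rename_i b2 rest2 heq
            rw [hk, List.drop_succ_cons, hd] at heq
            injection heq with h1 h2
            subst h1; subst h2
            rw [ih rest hlen]
      · -- first word does not fit: k = 0, emitted alone
        have hlt : max_words < 0 + ((PySem.Str.count w " " : Int) + 1) := not_le.mp hcond
        have hk : pvScanB max_words 0 (w :: t) = 0 := by
          show (if max_words < 0 + ((PySem.Str.count w " " : Int) + 1) then 0
                else pvScanB max_words (0 + ((PySem.Str.count w " " : Int) + 1)) t + 1)
               = 0
          rw [if_pos hlt]
        have hG : pvOuterG max_words ([] : List String) (w :: t) = w :: pvOuterG max_words [] t := by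
          simp only [pvOuterG, htok0]
          rw [if_neg (by simpa using hcond)]
          simp
        rw [hG, pvChunksB]
        rw [ih t (by simpa using Nat.lt_succ_iff.mp (by simpa using h))]
        simp [hk]

-- ===== VERDICT (by name: the statement is the Claim_ definition above) =====
theorem split_long_words_spec : Claim_equal_split_long_words := by
  intro words max_words _
  show split_long_words words max_words = split_long_words_alt words max_words
  have hA := A_to_G max_words words [] []
  simp only [pvChunkStr, List.map_nil, List.flatten_nil] at hA
  unfold split_long_words split_long_words_alt
  rw [hA]
  simp only [List.nil_append]
  exact G_eq_chunksB max_words words.length words (le_refl _)
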